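-- pv_equiv track=rewrite | github.com/tomcarralar/Tetris | TetrixConInterfaz/main.py | bloques_en_linea
-- ===== SOURCE A (Python) =====
-- CH_FICH = ord('A')  # Inicio secuencia caracteres fichero (mayúsculas)
--
-- def bloques_en_linea(lin):
--     i, n, c_ant = 0, 0, ' '
--     for c in lin:
--         if c != c_ant:
--             if c_ant != ' ':
--                 yield (i-n, i-1, ord(c_ant.upper())-CH_FICH)
--             c_ant = c
--             n = 1
--         else:
--             n += 1
--         i += 1
--     if c_ant != ' ':
--         yield (i-n, i-1, ord(c_ant.upper())-CH_FICH)
-- ===== SOURCE B (Python) =====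
-- CH_FICH = ord('A')
--
-- def bloques_en_linea(lin):
--     i, L = 0, len(lin)
--     while i < L:
--         j = i + 1
--         while j < L and lin[j] == lin[i]:
--             j += 1
--         if lin[i] != ' ':
--             yield (i, j - 1, ord(lin[i].upper()) - CH_FICH)
--         i = j
-- ===== Notes on version B (the rewrite author's own statement) =====
-- stated objective: alternative
-- what changed: Replaces the previous-char/counter state machine with a two-pointer scan that advances an inner pointer to the end of each maximal run and emits the block directly from the run's bounds.
import Mathlib
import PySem

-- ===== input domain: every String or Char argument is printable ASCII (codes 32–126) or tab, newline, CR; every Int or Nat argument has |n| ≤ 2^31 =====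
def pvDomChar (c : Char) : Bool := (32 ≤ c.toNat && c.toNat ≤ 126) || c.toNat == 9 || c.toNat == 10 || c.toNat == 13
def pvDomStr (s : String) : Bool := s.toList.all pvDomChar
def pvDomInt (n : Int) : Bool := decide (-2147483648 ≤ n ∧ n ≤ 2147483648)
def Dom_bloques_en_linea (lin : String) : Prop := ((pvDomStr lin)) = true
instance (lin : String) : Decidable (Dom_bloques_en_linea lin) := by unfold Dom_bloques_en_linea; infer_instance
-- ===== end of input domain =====

-- B replaces A's previous-char/counter state machine with a two-pointer maximal-run scan; return-value equivalence proved on Dom.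
-- ===== PORT A =====
-- value of a run character: ord(c.upper()) - CH_FICH, CH_FICH = ord('A') = 65
def pvVal (c : Char) : Int := ((PySem.Chars.upperChar c).toNat : Int) - 65

-- A's loop: state (i, n, c_ant); on exhaustion the trailing flush of the Python function
def pvLoopA : List Char → Int → Int → Char → List (Int × Int × Int) → List (Int × Int × Int)
  | [], i, n, ca, acc => if ca ≠ ' ' then acc ++ [(i - n, i - 1, pvVal ca)] else acc
  | c :: cs, i, n, ca, acc =>
      if c ≠ ca then
        pvLoopA cs (i + 1) 1 c (if ca ≠ ' ' then acc ++ [(i - n, i - 1, pvVal ca)] else acc)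
      else
        pvLoopA cs (i + 1) (n + 1) ca acc

def bloques_en_linea (lin : String) : List (Int × Int × Int) :=
  pvLoopA lin.toList 0 0 ' ' []

-- ===== PORT B =====
-- B's outer while over i: the run starting at the head has inner-pointer length 1 + k,
-- where k counts the following equal characters (the inner `while j < L and lin[j] == lin[i]`)
def pvGoB : List Char → Int → List (Int × Int × Int)
  | [], _ => []
  | c :: cs, i =>
      let k := (cs.takeWhile (· == c)).length
      let rest := pvGoB (cs.drop k) (i + 1 + k)
      if c ≠ ' ' then (i, i + k, pvVal c) :: rest else rest
  termination_by cs _ => cs.length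
  decreasing_by simp

def bloques_en_linea_alt (lin : String) : List (Int × Int × Int) :=
  pvGoB lin.toList 0

-- ===== PRECONDITION & SPEC =====
def Spec_bloques_en_linea (lin : String) (out : List (Int × Int × Int)) : Prop := out = bloques_en_linea_alt lin
instance (lin : String) (out : List (Int × Int × Int)) : Decidable (Spec_bloques_en_linea lin out) := by unfold Spec_bloques_en_linea; infer_instance

-- ===== CLAIM (what is proved, stated in full; the proofs are below) =====
def Claim_equal_bloques_en_linea : Prop := ∀ (lin : String), Dom_bloques_en_linea lin → Spec_bloques_en_linea lin (bloques_en_linea lin)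

-- ===== LEMMAS AND PROOFS =====

theorem pvGoB_nil (i : Int) : pvGoB [] i = [] := pvGoB.eq_1 i

theorem pvGoB_cons (c : Char) (cs : List Char) (i : Int) :
    pvGoB (c :: cs) i =
      (if c ≠ ' ' then
        [(i, i + ((cs.takeWhile (· == c)).length : Int), pvVal c)] else [])
        ++ pvGoB (cs.drop (cs.takeWhile (· == c)).length)
             (i + 1 + (cs.takeWhile (· == c)).length) := by
  rw [pvGoB.eq_2]
  split <;> simp

theorem pvDrop_takeWhile {cs : List Char} {c : Char} :
    cs.drop (cs.takeWhile (· == c)).length = cs.dropWhile (· == c) := by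
  induction cs with
  | nil => rfl
  | cons x xs ih =>
      by_cases h : x = c <;>
        simp [List.takeWhile_cons, List.dropWhile_cons, h, ih]

-- skipping a leading run of spaces: pvGoB does it in one step
theorem pvGoB_dropSpaces (cs : List Char) (i : Int) :
    pvGoB cs i = pvGoB (cs.dropWhile (· == ' ')) (i + (cs.takeWhile (· == ' ')).length) := by
  match cs with
  | [] => simp [pvGoB_nil]
  | c :: cs' =>
      by_cases h : c = ' '
      · subst h
        rw [pvGoB_cons]
        simp [List.takeWhile_cons, List.dropWhile_cons, pvDrop_takeWhile]
        congr 1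
        ring
      · simp [List.takeWhile_cons, List.dropWhile_cons, h]

-- the invariant connecting A's state machine to B's run scan
theorem pvLoopA_eq (cs : List Char) : ∀ (i n : Int) (ca : Char) (acc : List (Int × Int × Int)),
    pvLoopA cs i n ca acc =
      acc ++ (if ca ≠ ' ' then [(i - n, i - 1 + ((cs.takeWhile (· == ca)).length : Int), pvVal ca)] else [])
          ++ pvGoB (cs.dropWhile (· == ca)) (i + (cs.takeWhile (· == ca)).length) := by
  induction cs with
  | nil =>
      intro i n ca acc
      simp [pvLoopA, pvGoB_nil]
      split <;> simp
  | cons c cs ih =>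
      intro i n ca acc
      by_cases h : c = ca
      · subst h
        rw [pvLoopA]
        simp only [ne_eq, not_true_eq_false, if_false, ih]
        simp [List.takeWhile_cons, List.dropWhile_cons]
        ring_nf
      · rw [pvLoopA]
        simp only [ne_eq, h, not_false_eq_true, if_true]
        rw [ih]
        have ht : (c :: cs).takeWhile (· == ca) = [] := by
          simp [List.takeWhile_cons, h]
        have hd : (c :: cs).dropWhile (· == ca) = c :: cs := by
          simp [List.dropWhile_cons, h]
        rw [ht, hd, pvGoB_cons]
        by_cases hc : c = ' '
        · subst hc
          simp [pvDrop_takeWhile]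
          ring_nf
          split <;> simp
        · simp [hc, pvDrop_takeWhile]
          ring_nf
          split <;> simp

-- ===== VERDICT (by name: the statement is the Claim_ definition above) =====
theorem bloques_en_linea_spec : Claim_equal_bloques_en_linea := by
  intro lin _
  unfold Spec_bloques_en_linea bloques_en_linea bloques_en_linea_alt
  rw [pvLoopA_eq]
  simp
  rw [pvGoB_dropSpaces lin.toList 0]
  simp
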